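-- pv_equiv track=rewrite | github.com/ArchiePhung/SimulationAGV_workspace | sti_module/scripts/goal_controlFGV_v1.py | numberPointisValid
-- ===== SOURCE A (Python) =====
-- def numberPointisValid(idNow, listID):
--     temp = -1
--     num = -1
--     for i in range(len(listID)):
--         if listID[i] != 0:
--             temp = i
--             if idNow == listID[i]:
--                 num = i
--         else:
--             break
--
--     # ham return tra ve | so luong id co nghia sau id can tim | vi tri cua id tim | so luong id co nghia |
--     if temp == -1:
--         return -1, 0, 0 # list rong
--     elif num != -1:
--         return temp - num, num, temp # so phan tu co nghia sau id follow
--     else: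
--         return temp, num, temp # khong tim thay id trong list
-- ===== SOURCE B (Python) =====
-- def numberPointisValid(idNow, listID):
--     # prefix of values before the first zero
--     cut = listID.index(0) if 0 in listID else len(listID)
--     prefix = listID[:cut]
--     temp = len(prefix) - 1
--     # last index in prefix equal to idNow (reverse search), -1 if absent
--     if idNow in prefix:
--         num = len(prefix) - 1 - prefix[::-1].index(idNow)
--     else:
--         num = -1
--     if temp == -1:
--         return -1, 0, 0
--     elif num != -1:
--         return temp - num, num, temp
--     else:
--         return temp, num, temp
-- ===== Notes on version B (the rewrite author's own statement) =====
-- stated objective: alternative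
-- what changed: Replaces the index-counting for-loop with accumulators by slicing off the prefix before the first zero and a reverse .index search for the last occurrence of idNow.
import Mathlib
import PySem

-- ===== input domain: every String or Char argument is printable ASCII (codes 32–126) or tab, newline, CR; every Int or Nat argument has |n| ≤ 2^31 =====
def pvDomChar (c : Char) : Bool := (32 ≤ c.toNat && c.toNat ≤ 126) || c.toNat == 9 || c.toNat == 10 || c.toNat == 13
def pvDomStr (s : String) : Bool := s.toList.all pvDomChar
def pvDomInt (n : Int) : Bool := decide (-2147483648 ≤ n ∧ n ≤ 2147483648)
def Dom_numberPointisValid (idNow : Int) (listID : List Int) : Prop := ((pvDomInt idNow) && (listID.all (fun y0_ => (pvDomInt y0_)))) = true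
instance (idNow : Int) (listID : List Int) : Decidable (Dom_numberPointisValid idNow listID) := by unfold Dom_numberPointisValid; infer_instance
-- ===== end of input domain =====

-- B replaces A's index-counting loop with accumulators by a slice up to the first zero
-- plus a reverse search for the last occurrence of idNow (objective: alternative decomposition).

-- ===== PORT A =====
-- the for-i loop with break: structural recursion carrying i, temp, num
def pvLoopA (idNow : Int) : List Int → Int → Int → Int → Int × Int
  | [], _, temp, num => (temp, num)
  | x :: xs, i, temp, num =>
    if x ≠ 0 then
      pvLoopA idNow xs (i + 1) i (if idNow = x then i else num)
    else
      (temp, num)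

def numberPointisValid (idNow : Int) (listID : List Int) : Int × Int × Int :=
  let tn := pvLoopA idNow listID 0 (-1) (-1)
  let temp := tn.1
  let num := tn.2
  if temp = -1 then (-1, 0, 0)
  else if num ≠ -1 then (temp - num, num, temp)
  else (temp, num, temp)

-- ===== PORT B =====
def numberPointisValid_alt (idNow : Int) (listID : List Int) : Int × Int × Int :=
  -- cut = listID.index(0) if 0 in listID else len(listID)
  let cut : Nat := match PySem.List.index? listID 0 with
    | some j => j
    | none => listID.length
  -- listID[:cut] with 0 ≤ cut: exact as List.take
  let pref := listID.take cut
  let temp : Int := (pref.length : Int) - 1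
  -- idNow in prefix iff the reverse search succeeds; num = len-1 - prefix[::-1].index(idNow)
  let num : Int := match PySem.List.index? pref.reverse idNow with
    | some j => (pref.length : Int) - 1 - (j : Int)
    | none => -1
  if temp = -1 then (-1, 0, 0)
  else if num ≠ -1 then (temp - num, num, temp)
  else (temp, num, temp)

-- ===== PRECONDITION & SPEC =====
def Spec_numberPointisValid (idNow : Int) (listID : List Int) (out : Int × Int × Int) : Prop := out = numberPointisValid_alt idNow listID
instance (idNow : Int) (listID : List Int) (out : Int × Int × Int) : Decidable (Spec_numberPointisValid idNow listID out) := by unfold Spec_numberPointisValid; infer_instance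

-- ===== CLAIM (what is proved, stated in full; the proofs are below) =====
def Claim_equal_numberPointisValid : Prop := ∀ (idNow : Int) (listID : List Int), Dom_numberPointisValid idNow listID → Spec_numberPointisValid idNow listID (numberPointisValid idNow listID)

-- ===== LEMMAS AND PROOFS =====

-- the prefix B slices off is the takeWhile-(≠ 0) prefix
lemma take_cut_eq_takeWhile (xs : List Int) :
    xs.take (match PySem.List.index? xs 0 with
      | some j => j
      | none => xs.length) = xs.takeWhile (fun x => x ≠ 0) := by
  induction xs with
  | nil => simp
  | cons x xs ih =>
    by_cases hx : x = 0
    · subst hx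
      rw [PySem.List.index?_cons_self]
      simp
    · have hP : (x :: xs).takeWhile (fun x => x ≠ 0) = x :: xs.takeWhile (fun x => x ≠ 0) := by
        rw [List.takeWhile_cons, if_pos (by simpa using hx)]
      have hrw := PySem.List.index?_cons_of_ne (xs := xs) (v := (0 : Int)) hx
      rw [hP, hrw]
      cases h : PySem.List.index? xs 0 with
      | some j =>
        simp only [Option.map_some]
        rw [List.take_succ_cons]
        have hj : xs.take j = xs.takeWhile (fun x => x ≠ 0) := by rw [← ih, h]
        rw [hj]
      | none =>
        simp only [Option.map_none, List.length_cons]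
        rw [List.take_succ_cons]
        have hj : xs.take xs.length = xs.takeWhile (fun x => x ≠ 0) := by rw [← ih, h]
        rw [hj]

-- characterisation of A's loop by the takeWhile prefix
lemma pvLoopA_eq (idNow : Int) (xs : List Int) : ∀ (i temp num : Int),
    pvLoopA idNow xs i temp num =
      ((if (xs.takeWhile (fun x => x ≠ 0)) = [] then temp
        else i + ((xs.takeWhile (fun x => x ≠ 0)).length : Int) - 1),
       (match PySem.List.index? (xs.takeWhile (fun x => x ≠ 0)).reverse idNow with
        | some j => i + ((xs.takeWhile (fun x => x ≠ 0)).length : Int) - 1 - (j : Int)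
        | none => num)) := by
  induction xs with
  | nil => intro i temp num; simp [pvLoopA]
  | cons x xs ih =>
    intro i temp num
    by_cases hx : x = 0
    · subst hx; simp [pvLoopA]
    · have hP : (x :: xs).takeWhile (fun x => x ≠ 0) = x :: xs.takeWhile (fun x => x ≠ 0) := by
        rw [List.takeWhile_cons, if_pos (by simpa using hx)]
      rw [hP]
      have hstep : pvLoopA idNow (x :: xs) i temp num
          = pvLoopA idNow xs (i + 1) i (if idNow = x then i else num) := by
        simp [pvLoopA, hx]
      rw [hstep, ih]
      generalize xs.takeWhile (fun x => x ≠ 0) = P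
      rw [List.reverse_cons, Prod.mk.injEq]
      refine ⟨?_, ?_⟩
      · -- temp component
        by_cases hPe : P = [] <;> simp [hPe] <;> omega
      · -- num component
        by_cases hmem : idNow ∈ P.reverse
        · rw [PySem.List.index?_append_of_mem _ hmem]
          cases h : PySem.List.index? P.reverse idNow with
          | none => exact absurd ((PySem.List.index?_eq_none_iff _ _).mp h) (by simpa using hmem)
          | some j =>
            simp only [List.length_cons]
            push_cast
            ring
        · have h0 : PySem.List.index? P.reverse idNow = none :=
            (PySem.List.index?_eq_none_iff _ _).mpr hmem
          by_cases hid : idNow = x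
          · subst hid
            rw [PySem.List.index?_append_singleton_self P.reverse idNow hmem]
            simp only [h0, List.length_reverse, List.length_cons, if_pos]
            push_cast
            ring
          · have h1 : PySem.List.index? (P.reverse ++ [x]) idNow = none := by
              rw [PySem.List.index?_eq_none_iff]
              simp [hmem, hid]
            simp only [h0, h1, if_neg hid]

-- ===== VERDICT (by name: the statement is the Claim_ definition above) =====
theorem numberPointisValid_spec : Claim_equal_numberPointisValid := by
  intro idNow listID _
  unfold Spec_numberPointisValid numberPointisValid numberPointisValid_alt
  dsimp only
  rw [take_cut_eq_takeWhile, pvLoopA_eq]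
  generalize listID.takeWhile (fun x => x ≠ 0) = P
  by_cases hPe : P = []
  · simp [hPe]
  · have hlen : 1 ≤ P.length := by
      cases P with
      | nil => exact absurd rfl hPe
      | cons a l => simp
    have htemp : (if P = [] then (-1 : Int) else 0 + (P.length : Int) - 1) = (P.length : Int) - 1 := by
      simp [hPe]
    rw [htemp]
    have hne : ¬ ((P.length : Int) - 1 = -1) := by omega
    cases h : PySem.List.index? P.reverse idNow with
    | some j =>
      have hj : (j : Int) ≤ (P.length : Int) - 1 := by
        obtain ⟨hk, -⟩ := PySem.List.getElem_of_index?_eq_some h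
        simp at hk
        omega
      simp only [hne, if_false]
      have hnum : ¬ ((P.length : Int) - 1 - (j : Int) = -1) := by omega
      simp [hnum]
    | none =>
      simp [hne]
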